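-- pv_equiv track=rewrite | github.com/mkluza/Python | zestaw_4 - M.Kluza.py | prostokat
-- ===== SOURCE A (Python) =====
-- def prostokat(x, y):
--     if int(x) == 0 or int(y) == 0:
--         prostokat = ""
--         return prostokat
--
--     p = "+"
--     q = "|"
--     for i in range(int(y)):
--         p += "---+"
--         q += "   |"
--     prostokat = p
--     for i in range(int(x)):
--         prostokat += "\n" + q + "\n" + p
--
--     return prostokat
-- ===== SOURCE B (Python) =====
-- def prostokat(x, y):
--     h, w = int(x), int(y)
--     if h == 0 or w == 0:
--         return ""
--     cols = 4 * max(w, 0) + 1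
--     border = "".join('+' if c % 4 == 0 else '-' for c in range(cols))
--     inner = "".join('|' if c % 4 == 0 else ' ' for c in range(cols))
--     rows = 2 * max(h, 0) + 1
--     return "\n".join(border if r % 2 == 0 else inner for r in range(rows))
-- ===== Notes on version B (the rewrite author's own statement) =====
-- stated objective: alternative
-- what changed: B selects each character of the grid by its (row, column) position (c%4 / r%2 tests) over a cell grid and joins the lines, instead of A's incremental template-string concatenation of row segments.
import Mathlib
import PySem

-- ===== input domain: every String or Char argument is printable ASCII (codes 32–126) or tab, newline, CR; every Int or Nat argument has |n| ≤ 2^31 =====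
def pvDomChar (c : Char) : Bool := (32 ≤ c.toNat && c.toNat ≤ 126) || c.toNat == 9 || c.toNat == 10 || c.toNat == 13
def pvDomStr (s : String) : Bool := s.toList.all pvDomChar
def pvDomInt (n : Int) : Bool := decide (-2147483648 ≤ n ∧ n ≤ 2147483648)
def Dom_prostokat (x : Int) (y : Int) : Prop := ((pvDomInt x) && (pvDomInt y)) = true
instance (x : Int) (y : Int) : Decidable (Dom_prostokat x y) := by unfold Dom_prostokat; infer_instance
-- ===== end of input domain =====

-- B picks each character of the ASCII grid directly from its (row, column) position (r%2, c%4 tests)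
-- and joins the lines, instead of A's incremental concatenation of pre-built row template strings;
-- objective: alternative decomposition, same cost.

-- ===== PORT A =====
-- literal port of A: build row templates p and q by repeated concatenation, then append rows.
def prostokat (x : Int) (y : Int) : String :=
  if x = 0 ∨ y = 0 then ""
  else
    let pq := (PySem.List.pyRange 0 y 1).foldl
      (fun (pq : String × String) _ => (pq.1 ++ "---+", pq.2 ++ "   |")) ("+", "|")
    (PySem.List.pyRange 0 x 1).foldl
      (fun s _ => s ++ "\n" ++ pq.2 ++ "\n" ++ pq.1) pq.1

-- ===== PORT B =====
-- one line of the grid: character chosen by column position (border rows vs interior rows)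
def prostokatCell (border : Bool) (c : Nat) : Char :=
  if border then (if c % 4 == 0 then '+' else '-')
  else (if c % 4 == 0 then '|' else ' ')

def prostokat_alt (x : Int) (y : Int) : String :=
  if x = 0 ∨ y = 0 then ""
  else
    let cols := 4 * (max y 0).toNat + 1
    let border := String.ofList ((List.range cols).map (fun c => prostokatCell true c))
    let inner := String.ofList ((List.range cols).map (fun c => prostokatCell false c))
    let rows := 2 * (max x 0).toNat + 1
    PySem.Str.join "\n" ((List.range rows).map (fun r => if r % 2 == 0 then border else inner))

-- ===== PRECONDITION & SPEC =====
def Spec_prostokat (x : Int) (y : Int) (out : String) : Prop := out = prostokat_alt x y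
instance (x : Int) (y : Int) (out : String) : Decidable (Spec_prostokat x y out) := by unfold Spec_prostokat; infer_instance

-- ===== CLAIM (what is proved, stated in full; the proofs are below) =====
def Claim_equal_prostokat : Prop := ∀ (x : Int) (y : Int), Dom_prostokat x y → Spec_prostokat x y (prostokat x y)

-- ===== LEMMAS AND PROOFS =====

-- n copies of a segment, front-first
def repSeg {α : Type} (n : Nat) (seg : List α) : List α :=
  match n with
  | 0 => []
  | n + 1 => seg ++ repSeg n seg

theorem repSeg_succ_right {α : Type} (n : Nat) (seg : List α) :
    repSeg (n + 1) seg = repSeg n seg ++ seg := by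
  induction n with
  | zero => simp [repSeg]
  | succ n ih =>
      show seg ++ repSeg (n + 1) seg = (seg ++ repSeg n seg) ++ seg
      rw [ih, List.append_assoc]

theorem len_pyRange_one (y : Int) : (PySem.List.pyRange 0 y 1).length = y.toNat := by
  simp [PySem.List.pyRange]; omega

-- A's inner loop: the pair of templates
theorem foldA_inner (l : List Int) (p q : String) :
    ((l.foldl (fun (pq : String × String) _ => (pq.1 ++ "---+", pq.2 ++ "   |")) (p, q)).1.toList
        = p.toList ++ repSeg l.length "---+".toList) ∧
    ((l.foldl (fun (pq : String × String) _ => (pq.1 ++ "---+", pq.2 ++ "   |")) (p, q)).2.toList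
        = q.toList ++ repSeg l.length "   |".toList) := by
  induction l generalizing p q with
  | nil => simp [repSeg]
  | cons a l ih =>
      simp only [List.foldl_cons, List.length_cons]
      obtain ⟨ih1, ih2⟩ := ih (p ++ "---+") (q ++ "   |")
      constructor
      · rw [ih1]; simp [repSeg]
      · rw [ih2]; simp [repSeg]

-- A's outer loop: append a constant chunk l.length times
theorem foldA_outer (l : List Int) (s t u : String) :
    (l.foldl (fun s _ => s ++ "\n" ++ t ++ "\n" ++ u) s).toList
      = s.toList ++ repSeg l.length ('\n' :: t.toList ++ '\n' :: u.toList) := by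
  induction l generalizing s with
  | nil => simp [repSeg]
  | cons a l ih =>
      simp only [List.foldl_cons, List.length_cons]
      rw [ih]
      simp [repSeg]

-- B's border/interior lines as template char lists
theorem lineB_border (n : Nat) :
    (List.range (4 * n + 1)).map (fun c => prostokatCell true c)
      = '+' :: repSeg n "---+".toList := by
  induction n with
  | zero => decide
  | succ n ih =>
      have h : 4 * (n + 1) + 1 = (4 * n + 1) + 1 + 1 + 1 + 1 := by omega
      rw [h, List.range_succ, List.range_succ, List.range_succ, List.range_succ]
      simp only [List.map_append, ih, List.map_cons, List.map_nil]
      have e1 : prostokatCell true (4 * n + 1) = '-' := by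
        simp [prostokatCell]
      have e2 : prostokatCell true (4 * n + 1 + 1) = '-' := by
        simp [prostokatCell]; omega
      have e3 : prostokatCell true (4 * n + 1 + 1 + 1) = '-' := by
        simp [prostokatCell]; omega
      have e4 : prostokatCell true (4 * n + 1 + 1 + 1 + 1) = '+' := by
        simp [prostokatCell]; omega
      rw [e1, e2, e3, e4, repSeg_succ_right]
      simp

theorem lineB_interior (n : Nat) :
    (List.range (4 * n + 1)).map (fun c => prostokatCell false c)
      = '|' :: repSeg n "   |".toList := by
  induction n with
  | zero => decide
  | succ n ih =>
      have h : 4 * (n + 1) + 1 = (4 * n + 1) + 1 + 1 + 1 + 1 := by omega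
      rw [h, List.range_succ, List.range_succ, List.range_succ, List.range_succ]
      simp only [List.map_append, ih, List.map_cons, List.map_nil]
      have e1 : prostokatCell false (4 * n + 1) = ' ' := by
        simp [prostokatCell]
      have e2 : prostokatCell false (4 * n + 1 + 1) = ' ' := by
        simp [prostokatCell]; omega
      have e3 : prostokatCell false (4 * n + 1 + 1 + 1) = ' ' := by
        simp [prostokatCell]; omega
      have e4 : prostokatCell false (4 * n + 1 + 1 + 1 + 1) = '|' := by
        simp [prostokatCell]; omega
      rw [e1, e2, e3, e4, repSeg_succ_right]
      simp

-- B's row list: the first row is a border row, then m repetitions of (interior, border)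
theorem rowsB (m : Nat) (P Q : List Char) :
    (List.range (2 * m + 1)).map (fun r =>
        if r % 2 == 0 then P else Q)
      = P :: repSeg m [Q, P] := by
  induction m with
  | zero => simp [repSeg]
  | succ m ih =>
      have h : 2 * (m + 1) + 1 = (2 * m + 1) + 1 + 1 := by omega
      rw [h, List.range_succ, List.range_succ]
      simp only [List.map_append, ih, List.map_cons, List.map_nil]
      have e1 : ((2 * m + 1) % 2 == 0) = false := by simp
      have e2 : ((2 * m + 1 + 1) % 2 == 0) = true := by simp; omega
      rw [e1, e2, repSeg_succ_right]
      simp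

-- joining the alternating row list with newlines
theorem joinB (m : Nat) (P Q : List Char) :
    PySem.Chars.join ['\n'] (P :: repSeg m [Q, P])
      = P ++ repSeg m ('\n' :: Q ++ '\n' :: P) := by
  induction m with
  | zero => simp [repSeg, PySem.Chars.join_singleton]
  | succ m ih =>
      show PySem.Chars.join ['\n'] (P :: Q :: P :: repSeg m [Q, P]) = _
      rw [PySem.Chars.join_cons_cons, PySem.Chars.join_cons_cons, ih]
      simp [repSeg]

-- ===== VERDICT (by name: the statement is the Claim_ definition above) =====
theorem prostokat_spec : Claim_equal_prostokat := by
  intro x y _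
  unfold Spec_prostokat prostokat prostokat_alt
  by_cases h : x = 0 ∨ y = 0
  · simp [h]
  · simp only [h, if_false]
    apply String.toList_injective
    rw [foldA_outer]
    rw [(foldA_inner (PySem.List.pyRange 0 y 1) "+" "|").1,
        (foldA_inner (PySem.List.pyRange 0 y 1) "+" "|").2]
    rw [PySem.Str.toList_join]
    have hy : (max y 0).toNat = y.toNat := by omega
    have hx : (max x 0).toNat = x.toNat := by omega
    rw [hy, hx, List.map_map]
    have hmap : (List.range (2 * x.toNat + 1)).map
        (String.toList ∘ fun r =>
          if r % 2 == 0 then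
            String.ofList ((List.range (4 * y.toNat + 1)).map (fun c => prostokatCell true c))
          else
            String.ofList ((List.range (4 * y.toNat + 1)).map (fun c => prostokatCell false c)))
        = (List.range (2 * x.toNat + 1)).map (fun r =>
            if r % 2 == 0 then '+' :: repSeg y.toNat "---+".toList
            else '|' :: repSeg y.toNat "   |".toList) := by
      apply List.map_congr_left
      intro r _
      simp only [Function.comp_apply]
      by_cases hr : (r % 2 == 0) = true
      · simp only [hr, if_true, String.toList_ofList]
        exact lineB_border y.toNat
      · rw [Bool.not_eq_true] at hr
        simp only [hr, Bool.false_eq_true, if_false, String.toList_ofList]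
        exact lineB_interior y.toNat
    rw [hmap, rowsB]
    have hnl : "\n".toList = ['\n'] := rfl
    rw [hnl, joinB, len_pyRange_one, len_pyRange_one]
    simp
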